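-- pv_equiv track=rewrite | github.com/luckydonald-learning/ml_itsec | exec3.py | calc_k_matrix
-- ===== SOURCE A (Python) =====
-- def split_word(word, delimiters, strip=True, omit_words=[]):
--     """
--     Splits a text by delemiters, which must be a list
--     :param word:
--     :type  word: str
--
--     :param delimiters:
--     :type  delimiters: list of str
--
--     :param strip:
--     :type  strip: bool
--
--     :param omit_words: Words which should be ignored.
--     :type  omit_words: list of str
--
--     :return:
--     """
--     if strip:
--         word = word.strip()
--     # end if
--     if len(delimiters) <= 0:
--         yield word
--         return
--     # end if
--     d = delimiters[0]
--     words = word.split(d)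
--     for w in words:
--         if w == "":  # skip empty splits
--             continue
--         # end if
--         if w in omit_words:
--             continue
--         # end if
--         yield from split_word(w, delimiters[1:])
--
-- def get_stuff(sentence):
--     return do_count(split_word(sentence, [' ', ',', '.', '?']))
--
-- def do_count(word_generator):
--     """
--     :param sentence:
--     :return: count bag. Keys are the alphabet, value the count.  `{"foo": 12}`
--     :rtype: dict
--     """
--     bagsofwords = {}
--
--     for word in word_generator:
--         if word not in bagsofwords:
--             bagsofwords[word] = 1
--         else:
--             bagsofwords[word] += 1
--         # end if
--     # end for
--     return bagsofwords
--
-- def calc_k(counts_x, counts_z, alphabet, d=1):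
--     k = sum(counts_x[w] * counts_z[w] for w in alphabet) ** d
--     # kernel k = ( ∑( #w(x) • #w(z) ) ) ^ d
--     return k
--
-- def merge_alphabets(counts_x, counts_z):
--     alphabet = set()
--     # fill in count of missing values
--     for word in counts_x.keys():
--         alphabet.add(word)
--         counts_z.setdefault(word, 0)
--     # end for
--     for word in counts_z.keys():
--         alphabet.add(word)
--         counts_x.setdefault(word, 0)
--     # end for
--     return alphabet, counts_x, counts_z
--
-- def calc_k_matrix(sentences, d):
--     matrix = []
--     for x in sentences:
--         foo = []
--         counts_x = get_stuff(x)
--         matrix.append(foo)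
--         for z in sentences:
--             counts_z = get_stuff(z)
--             # collect alphabet
--             alphabet, counts_x, counts_z = merge_alphabets(counts_x, counts_z)
--             k = calc_k(counts_x, counts_z, alphabet, d)
--             foo.append(k)
--         # end for
--     # end for
--     return matrix
-- ===== SOURCE B (Python) =====
-- def _token_counts(sentence):
--     # breadth-first splitting: one pass per delimiter over all current pieces
--     pieces = [sentence]
--     for delim in [' ', ',', '.', '?']:
--         pieces = [q for p in pieces for q in p.strip().split(delim) if q != ""]
--     counts = {}
--     for p in pieces:
--         t = p.strip()
--         counts[t] = counts.get(t, 0) + 1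
--     return counts
--
--
-- def calc_k_matrix(sentences, d):
--     counts = [_token_counts(s) for s in sentences]
--     return [[sum(cx[w] * cz.get(w, 0) for w in cx) ** d for cz in counts]
--             for cx in counts]
-- ===== Notes on version B (the rewrite author's own statement) =====
-- stated objective: faster
-- what changed: B tokenizes and counts each sentence once up front (breadth-first multi-delimiter split instead of A's recursive generator) and computes each kernel entry by summing over the row dict's own keys, removing A's per-pair re-parsing of z and mutual zero-padding alphabet merge.
-- outside the precondition, e.g. on calc_k_matrix(['a'], -1): A returns [[1.0]], B returns [[1.0]]
import Mathlib
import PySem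

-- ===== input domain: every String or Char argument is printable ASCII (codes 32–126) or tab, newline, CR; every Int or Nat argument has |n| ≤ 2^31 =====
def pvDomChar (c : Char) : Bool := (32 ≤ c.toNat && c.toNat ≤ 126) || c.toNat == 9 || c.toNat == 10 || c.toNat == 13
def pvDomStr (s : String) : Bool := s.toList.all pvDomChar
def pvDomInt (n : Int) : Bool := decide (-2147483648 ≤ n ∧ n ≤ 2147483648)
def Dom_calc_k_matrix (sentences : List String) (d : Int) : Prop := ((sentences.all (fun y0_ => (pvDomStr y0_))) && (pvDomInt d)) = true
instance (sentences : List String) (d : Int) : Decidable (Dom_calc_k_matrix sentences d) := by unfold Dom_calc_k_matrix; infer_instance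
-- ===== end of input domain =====

-- B precomputes each sentence's bag-of-words once and sums over the row dict's own keys,
-- instead of A's per-pair re-parsing and mutual alphabet merging; same return value on Pre_.

-- ===== PORT A =====
-- split_word(word, delimiters, strip=True, omit_words=[]): strip is True at every call site.
def splitWordA (word : String) (delims : List String) (omitWords : List String) : List String :=
  let w := PySem.Str.strip word
  match delims with
  | [] => [w]
  | dl :: rest =>
      -- 'word.split(d)' with the nonempty literal delimiters used here; getD [] is unreachable
      ((PySem.Str.split? w dl).getD []).foldl
        (fun acc x =>
          if x == "" then acc
          else if omitWords.contains x then acc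
          else acc ++ splitWordA x rest []) []

def doCountA (ws : List String) : PySem.Dict String Int :=
  ws.foldl
    (fun bag w =>
      if !(bag.contains w) then bag.insert w 1
      else bag.insert w (bag.getD w 0 + 1)) PySem.Dict.empty

def getStuffA (s : String) : PySem.Dict String Int :=
  doCountA (splitWordA s [" ", ",", ".", "?"] [])

-- counts_x[w] / counts_z[w]: both dicts contain every alphabet word at this call site, so
-- getD 0 is exact; the sum over the Python set is order-independent; ** d with 0 ≤ d (Pre_).
def calcKA (cx cz : PySem.Dict String Int) (alphabet : List String) (d : Int) : Int :=
  ((alphabet.map (fun w => cx.getD w 0 * cz.getD w 0)).sum) ^ d.toNat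

def mergeAlphabetsA (cx cz : PySem.Dict String Int) :
    PySem.Set String × PySem.Dict String Int × PySem.Dict String Int :=
  let p1 := cx.keys.foldl
    (fun (p : PySem.Set String × PySem.Dict String Int) w =>
      (PySem.Set.add p.1 w, p.2.setdefault w 0)) (PySem.Set.empty, cz)
  let p2 := p1.2.keys.foldl
    (fun (p : PySem.Set String × PySem.Dict String Int) w =>
      (PySem.Set.add p.1 w, p.2.setdefault w 0)) (p1.1, cx)
  (p2.1, p2.2, p1.2)

-- matrix.append(foo) happens before the inner loop but foo is only mutated by appends,
-- so the effect equals appending the finished row; counts_x is rebound each inner step.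
def calc_k_matrix (sentences : List String) (d : Int) : List (List Int) :=
  sentences.foldl
    (fun matrix x =>
      let countsX := getStuffA x
      let inner := sentences.foldl
        (fun (p : List Int × PySem.Dict String Int) z =>
          let countsZ := getStuffA z
          let m := mergeAlphabetsA p.2 countsZ
          (p.1 ++ [calcKA m.2.1 m.2.2 m.1 d], m.2.1)) ([], countsX)
      matrix ++ [inner.1]) []

-- ===== PORT B =====
def tokenCountsB (sentence : String) : PySem.Dict String Int :=
  let pieces := [" ", ",", ".", "?"].foldl
    (fun ps delim => ps.flatMap (fun p =>
      ((PySem.Str.split? (PySem.Str.strip p) delim).getD []).filter (fun q => q != "")))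
    [sentence]
  pieces.foldl
    (fun c p =>
      let t := PySem.Str.strip p
      c.insert t (c.getD t 0 + 1)) PySem.Dict.empty

def calc_k_matrix_alt (sentences : List String) (d : Int) : List (List Int) :=
  let counts := sentences.map tokenCountsB
  counts.map (fun cx =>
    counts.map (fun cz =>
      ((cx.keys.map (fun w => cx.getD w 0 * cz.getD w 0)).sum) ^ d.toNat))

-- ===== PRECONDITION & SPEC =====
-- Pre_ excludes only inputs on which A does not return an int matrix: with d < 0 and at least
-- one sentence, every kernel entry is float (sum**d) or ZeroDivisionError (sum = 0, d < 0).
def Pre_calc_k_matrix (sentences : List String) (d : Int) : Prop := 0 ≤ d ∨ sentences = []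
instance (sentences : List String) (d : Int) : Decidable (Pre_calc_k_matrix sentences d) := by
  unfold Pre_calc_k_matrix; infer_instance

def pvWitness_calc_k_matrix : List String × Int := (["a b a", "b, c."], 2)

def Spec_calc_k_matrix (sentences : List String) (d : Int) (out : List (List Int)) : Prop := out = calc_k_matrix_alt sentences d
instance (sentences : List String) (d : Int) (out : List (List Int)) : Decidable (Spec_calc_k_matrix sentences d out) := by unfold Spec_calc_k_matrix; infer_instance

-- ===== CLAIM (what is proved, stated in full; the proofs are below) =====
def Claim_equal_calc_k_matrix : Prop := ∀ (sentences : List String) (d : Int), Dom_calc_k_matrix sentences d → Pre_calc_k_matrix sentences d → Spec_calc_k_matrix sentences d (calc_k_matrix sentences d)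

-- ===== LEMMAS AND PROOFS =====

-- the token list both sides count
def tokensOf (s : String) : List String := splitWordA s [" ", ",", ".", "?"] []

def cntOf (s : String) : PySem.Dict String Int := PySem.Dict.counter (tokensOf s)

def padZeros (dct : PySem.Dict String Int) (ws : List String) : PySem.Dict String Int :=
  ws.foldl (fun d k => d.setdefault k 0) dct

def entryOf (cx cz : PySem.Dict String Int) (d : Int) : Int :=
  ((cx.keys.map (fun w => cx.getD w 0 * cz.getD w 0)).sum) ^ d.toNat

lemma getD_padZeros (ws : List String) (dct : PySem.Dict String Int) (w : String) :
    (padZeros dct ws).getD w 0 = dct.getD w 0 := by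
  induction ws generalizing dct with
  | nil => rfl
  | cons k t ih =>
      have hstep : (dct.setdefault k 0).getD w 0 = dct.getD w 0 := by
        by_cases h : w = k
        · subst h; exact PySem.Dict.getD_setdefault_self dct w 0 0
        · rw [PySem.Dict.getD_eq_get?_getD, PySem.Dict.get?_setdefault_of_ne dct 0 h,
              ← PySem.Dict.getD_eq_get?_getD]
      simpa [padZeros, hstep] using ih (dct.setdefault k 0)

lemma contains_padZeros (ws : List String) (dct : PySem.Dict String Int) (w : String)
    (h : dct.contains w = true) : (padZeros dct ws).contains w = true := by
  induction ws generalizing dct with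
  | nil => exact h
  | cons k t ih =>
      have : (dct.setdefault k 0).contains w = true := by
        rw [PySem.Dict.contains_setdefault]; simp [h]
      simpa [padZeros] using ih _ this

lemma merge_eq (cx cz : PySem.Dict String Int) :
    mergeAlphabetsA cx cz =
      (PySem.Set.update (PySem.Set.ofList cx.keys) (padZeros cz cx.keys).keys,
       padZeros cx (padZeros cz cx.keys).keys,
       padZeros cz cx.keys) := by
  have hsplit : ∀ (a : PySem.Set String) (b : PySem.Dict String Int) (l : List String),
      List.foldl (fun (p : PySem.Set String × PySem.Dict String Int) w =>
        (PySem.Set.add p.1 w, p.2.setdefault w 0)) (a, b) l =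
      (List.foldl (fun s w => PySem.Set.add s w) a l,
       List.foldl (fun dd w => dd.setdefault w 0) b l) :=
    fun a b l => PySem.List.foldl_prod_mk (fun s w => PySem.Set.add s w)
      (fun dd w => dd.setdefault w 0) l a b
  unfold mergeAlphabetsA padZeros
  simp only [hsplit]
  simp [PySem.Set.update, PySem.Set.ofList_eq_foldl, PySem.Set.empty]

lemma sum_over_superset (l1 l2 : List String) (f : String → Int)
    (h1 : l1.Nodup) (h2 : l2.Nodup) (hsub : ∀ w ∈ l2, w ∈ l1)
    (hz : ∀ w ∈ l1, w ∉ l2 → f w = 0) :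
    (l1.map f).sum = (l2.map f).sum := by
  rw [← List.sum_toFinset f h1, ← List.sum_toFinset f h2]
  refine (Finset.sum_subset ?_ ?_).symm
  · intro x hx; rw [List.mem_toFinset] at *; exact hsub x hx
  · intro x hx hnx; rw [List.mem_toFinset] at hx hnx; exact hz x hx hnx

lemma doCountA_eq_counter (ws : List String) : doCountA ws = PySem.Dict.counter ws := by
  have hstep : (fun (bag : PySem.Dict String Int) w =>
      if !(bag.contains w) then bag.insert w 1 else bag.insert w (bag.getD w 0 + 1)) =
      (fun (bag : PySem.Dict String Int) w => bag.insert w (bag.getD w 0 + 1)) := by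
    funext bag w
    cases h : bag.contains w with
    | false => simp [PySem.Dict.getD_of_not_contains bag (0 : Int) h]
    | true => simp
  unfold doCountA
  rw [hstep, PySem.Dict.foldl_insert_getD_add_one_eq_counter]

lemma foldl_skip_append {β : Type} (f : String → List β) (l : List String) (acc : List β) :
    l.foldl (fun acc x => if x == "" then acc else if ([] : List String).contains x then acc
                          else acc ++ f x) acc
      = acc ++ (l.filter (fun q => q != "")).flatMap f := by
  induction l generalizing acc with
  | nil => simp
  | cons x t ih =>
      by_cases h : x = ""
      · subst h; simpa using ih acc
      · rw [List.foldl_cons]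
        have hhead : (if (x == "") = true then acc
            else if ([] : List String).contains x = true then acc else acc ++ f x)
            = acc ++ f x := by simp [h]
        rw [hhead, ih]
        simp [h, List.append_assoc]

lemma splitWordA_cons (w dl : String) (rest : List String) :
    splitWordA w (dl :: rest) [] =
      (((PySem.Str.split? (PySem.Str.strip w) dl).getD []).filter (fun q => q != "")).flatMap
        (fun x => splitWordA x rest []) := by
  rw [splitWordA]
  exact foldl_skip_append _ _ []

def levelsB (delims : List String) (ps : List String) : List String :=
  delims.foldl
    (fun ps delim => ps.flatMap (fun p =>
      ((PySem.Str.split? (PySem.Str.strip p) delim).getD []).filter (fun q => q != ""))) ps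

lemma levels_map_strip (delims : List String) (ps : List String) :
    (levelsB delims ps).map PySem.Str.strip = ps.flatMap (fun p => splitWordA p delims []) := by
  induction delims generalizing ps with
  | nil =>
      simp only [levelsB, List.foldl_nil]
      induction ps with
      | nil => rfl
      | cons p t ih => simp [splitWordA, ih]
  | cons dl rest ih =>
      simp only [levelsB, List.foldl_cons] at *
      rw [ih, List.flatMap_assoc]
      have hfun : (fun x => (((PySem.Str.split? (PySem.Str.strip x) dl).getD []).filter
            (fun q => q != "")).flatMap (fun y => splitWordA y rest [])) =
          (fun p => splitWordA p (dl :: rest) []) :=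
        funext fun p => (splitWordA_cons p dl rest).symm
      rw [hfun]

lemma tokenCountsB_eq_counter (s : String) : tokenCountsB s = cntOf s := by
  unfold tokenCountsB cntOf
  have hl : levelsB [" ", ",", ".", "?"] [s] =
      [" ", ",", ".", "?"].foldl
        (fun ps delim => ps.flatMap (fun p =>
          ((PySem.Str.split? (PySem.Str.strip p) delim).getD []).filter (fun q => q != "")))
        [s] := rfl
  rw [← hl]
  have hmap := levels_map_strip [" ", ",", ".", "?"] [s]
  have htok : (levelsB [" ", ",", ".", "?"] [s]).map PySem.Str.strip = tokensOf s := by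
    rw [hmap]; simp [tokensOf]
  calc (levelsB [" ", ",", ".", "?"] [s]).foldl
        (fun c p => c.insert (PySem.Str.strip p) (c.getD (PySem.Str.strip p) 0 + 1))
        PySem.Dict.empty
      = ((levelsB [" ", ",", ".", "?"] [s]).map PySem.Str.strip).foldl
        (fun c t => c.insert t (c.getD t 0 + 1)) PySem.Dict.empty := by
        rw [List.foldl_map]
    _ = PySem.Dict.counter (tokensOf s) := by
        rw [htok, PySem.Dict.foldl_insert_getD_add_one_eq_counter]

lemma getStuffA_eq (s : String) : getStuffA s = cntOf s := by
  unfold getStuffA cntOf tokensOf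
  exact doCountA_eq_counter _

-- the inner-loop invariant on the threaded counts_x
def InvX (x : String) (cx : PySem.Dict String Int) : Prop :=
  (∀ w, cx.getD w 0 = (cntOf x).getD w 0) ∧
  (∀ w, (cntOf x).contains w = true → cx.contains w = true)

lemma InvX_init (x : String) : InvX x (cntOf x) := ⟨fun _ => rfl, fun _ h => h⟩

lemma InvX_pad (x : String) (cx : PySem.Dict String Int) (h : InvX x cx) (ws : List String) :
    InvX x (padZeros cx ws) :=
  ⟨fun w => (getD_padZeros ws cx w).trans (h.1 w),
   fun w hw => contains_padZeros ws cx w (h.2 w hw)⟩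

set_option maxHeartbeats 1000000 in
lemma entry_eq (x z : String) (d : Int) (cx : PySem.Dict String Int) (h : InvX x cx) :
    calcKA (mergeAlphabetsA cx (cntOf z)).2.1 (mergeAlphabetsA cx (cntOf z)).2.2
           (mergeAlphabetsA cx (cntOf z)).1 d = entryOf (cntOf x) (cntOf z) d := by
  rw [merge_eq]
  unfold calcKA entryOf
  refine congrArg (fun t => t ^ d.toNat) ?_
  have hfun : (fun w => (padZeros cx (padZeros (cntOf z) cx.keys).keys).getD w 0 *
        (padZeros (cntOf z) cx.keys).getD w 0) =
      (fun w => (cntOf x).getD w 0 * (cntOf z).getD w 0) := by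
    funext w
    rw [getD_padZeros, getD_padZeros, h.1 w]
  simp only [hfun]
  apply sum_over_superset
  · exact PySem.Set.nodup_update _ _ (PySem.Set.nodup_ofList _)
  · exact PySem.Dict.nodup_keys_counter _
  · intro w hw
    have hcx : cx.contains w = true :=
      h.2 w ((PySem.Dict.contains_iff_mem_keys _ _).mpr hw)
    rw [PySem.Set.mem_update]
    exact Or.inl ((PySem.Set.mem_ofList _ _).mpr
      ((PySem.Dict.contains_iff_mem_keys _ _).mp hcx))
  · intro w _ hnw
    have : (cntOf x).contains w = false := by
      by_contra hcon
      exact hnw ((PySem.Dict.contains_iff_mem_keys _ _).mp (by simpa using hcon))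
    rw [PySem.Dict.getD_of_not_contains _ _ this, zero_mul]

lemma inner_loop (x : String) (d : Int) (zs : List String) :
    ∀ (cx : PySem.Dict String Int) (acc : List Int), InvX x cx →
    (zs.foldl
      (fun (p : List Int × PySem.Dict String Int) z =>
        let countsZ := getStuffA z
        let m := mergeAlphabetsA p.2 countsZ
        (p.1 ++ [calcKA m.2.1 m.2.2 m.1 d], m.2.1)) (acc, cx)).1
      = acc ++ zs.map (fun z => entryOf (cntOf x) (cntOf z) d) := by
  induction zs with
  | nil => intro cx acc _; simp
  | cons z t ih =>
      intro cx acc hinv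
      simp only [List.foldl_cons, List.map_cons]
      rw [getStuffA_eq]
      have hk := entry_eq x z d cx hinv
      have hinv' : InvX x (mergeAlphabetsA cx (cntOf z)).2.1 := by
        rw [merge_eq]; exact InvX_pad x cx hinv _
      rw [ih _ _ hinv', hk]
      simp

-- ===== VERDICT (by name: the statement is the Claim_ definition above) =====
theorem calc_k_matrix_spec : Claim_equal_calc_k_matrix := by
  intro sentences d _ _
  unfold Spec_calc_k_matrix calc_k_matrix calc_k_matrix_alt
  have hrow : (fun (matrix : List (List Int)) x =>
      matrix ++ [(sentences.foldl
        (fun (p : List Int × PySem.Dict String Int) z =>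
          let countsZ := getStuffA z
          let m := mergeAlphabetsA p.2 countsZ
          (p.1 ++ [calcKA m.2.1 m.2.2 m.1 d], m.2.1)) ([], getStuffA x)).1]) =
      (fun matrix x => matrix ++ [sentences.map (fun z => entryOf (cntOf x) (cntOf z) d)]) := by
    funext matrix x
    rw [getStuffA_eq, inner_loop x d sentences (cntOf x) [] (InvX_init x)]
    simp
  simp only [hrow]
  rw [PySem.List.foldl_append_singleton_eq_map
    (fun x => sentences.map (fun z => entryOf (cntOf x) (cntOf z) d)) sentences []]
  simp only [List.nil_append, List.map_map, Function.comp_def, tokenCountsB_eq_counter]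
  rfl
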